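-- pv_equiv track=rewrite | github.com/bj0key/snuscode | snus.py | snus_v1
-- ===== SOURCE A (Python) =====
-- def snus_v1(raw):
--     """encode to v1 snuscode"""
--     enc = ""
--     for c in raw:
--         # For each char, encode into a 5-digit ternary 'number'
--         n = ord(c)
--         w = ""
--         for i in range(5):
--             d, r = divmod(n, 3)
--             w += "snu"[r]
--             n = d
--         enc += w[::-1]
--     return(enc)
-- ===== SOURCE B (Python) =====
-- def snus_v1(raw):
--     """encode to v1 snuscode"""
--     return "".join(
--         "snu"[(ord(c) // 3 ** i) % 3]
--         for c in raw
--         for i in range(4, -1, -1)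
--     )
-- ===== Notes on version B (the rewrite author's own statement) =====
-- stated objective: simpler
-- what changed: B emits each character's five ternary digits most-significant-first via (ord(c)//3**i)%3 in a single join over a generator, eliminating A's per-character LSB-first buffer, its string reversal, and the running accumulator.
import Mathlib
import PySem

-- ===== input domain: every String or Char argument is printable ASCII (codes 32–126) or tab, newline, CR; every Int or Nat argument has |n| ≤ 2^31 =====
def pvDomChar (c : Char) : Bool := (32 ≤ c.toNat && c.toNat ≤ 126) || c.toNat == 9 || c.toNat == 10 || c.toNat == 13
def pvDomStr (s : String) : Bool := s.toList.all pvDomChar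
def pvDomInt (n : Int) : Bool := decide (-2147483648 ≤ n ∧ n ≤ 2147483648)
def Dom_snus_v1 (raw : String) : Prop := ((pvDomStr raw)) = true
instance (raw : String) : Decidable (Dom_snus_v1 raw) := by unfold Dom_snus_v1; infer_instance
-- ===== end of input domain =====

-- B builds each 5-letter block most-significant-digit first via (ord(c)//3**i)%3, removing A's
-- per-character LSB buffer and its [::-1] reversal (objective: simpler decomposition).

-- ===== PORT A =====
-- inner loop: for i in range(5): d, r = divmod(n, 3); w += "snu"[r]; n = d
-- "snu"[r] always has 0 ≤ r < 3, so the pyGetD default is never used; w[::-1] is reverse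
-- (PySem.List.slice?_none_none_neg_one).
def snus_v1 (raw : String) : String :=
  String.ofList <| raw.toList.foldl (fun enc c =>
    let n : Int := (c.toNat : Int)
    let st := (PySem.List.pyRange 0 5 1).foldl (fun (st : Int × List Char) _ =>
      let d := PySem.Int.floordiv st.1 3
      let r := PySem.Int.mod st.1 3
      (d, st.2 ++ [PySem.List.pyGetD "snu".toList r 's'])) (n, [])
    enc ++ st.2.reverse) []

-- ===== PORT B =====
def snus_v1_alt (raw : String) : String :=
  String.ofList <| raw.toList.flatMap (fun c =>
    (PySem.List.pyRange 4 (-1) (-1)).map (fun i =>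
      PySem.List.pyGetD "snu".toList
        (PySem.Int.mod (PySem.Int.floordiv (c.toNat : Int) ((3 : Int) ^ i.toNat)) 3) 's'))

-- ===== PRECONDITION & SPEC =====
def Spec_snus_v1 (raw : String) (out : String) : Prop := out = snus_v1_alt raw
instance (raw : String) (out : String) : Decidable (Spec_snus_v1 raw out) := by unfold Spec_snus_v1; infer_instance

-- ===== CLAIM (what is proved, stated in full; the proofs are below) =====
def Claim_equal_snus_v1 : Prop := ∀ (raw : String), Dom_snus_v1 raw → Spec_snus_v1 raw (snus_v1 raw)

-- ===== LEMMAS AND PROOFS =====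

-- Per-character agreement: A's reversed LSB-first block equals B's MSB-first block.
lemma snus_block_eq (c : Char) :
    ((PySem.List.pyRange 0 5 1).foldl (fun (st : Int × List Char) _ =>
      let d := PySem.Int.floordiv st.1 3
      let r := PySem.Int.mod st.1 3
      (d, st.2 ++ [PySem.List.pyGetD "snu".toList r 's'])) ((c.toNat : Int), [])).2.reverse
    = (PySem.List.pyRange 4 (-1) (-1)).map (fun i =>
      PySem.List.pyGetD "snu".toList
        (PySem.Int.mod (PySem.Int.floordiv (c.toNat : Int) ((3 : Int) ^ i.toNat)) 3) 's') := by
  have h5 : PySem.List.pyRange 0 5 1 = [0, 1, 2, 3, 4] := by decide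
  have hd : PySem.List.pyRange 4 (-1) (-1) = [4, 3, 2, 1, 0] := by decide
  set m := c.toNat with hm
  simp only [h5, hd, List.foldl, List.map, List.reverse_cons, List.reverse_nil,
    List.nil_append, List.cons_append]
  have cast_div : ∀ (a b : Nat), PySem.Int.floordiv (a : Int) (b : Int) = ((a / b : Nat) : Int) :=
    fun a b => PySem.Int.floordiv_natCast a b
  have cast_mod : ∀ (a b : Nat), PySem.Int.mod (a : Int) (b : Int) = ((a % b : Nat) : Int) :=
    fun a b => PySem.Int.mod_natCast a b
  norm_num [cast_div, cast_mod, Nat.div_div_eq_div_mul]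
  have h2 : Int.toNat 2 = 2 := rfl
  have h3 : Int.toNat 3 = 3 := rfl
  have h4 : Int.toNat 4 = 4 := rfl
  refine ⟨?_, ?_, ?_⟩ <;> (congr 1; simp only [h2, h3, h4]; norm_num [Int.ediv_ediv_of_nonneg])

-- ===== VERDICT (by name: the statement is the Claim_ definition above) =====
theorem snus_v1_spec : Claim_equal_snus_v1 := by
  intro raw _
  unfold Spec_snus_v1 snus_v1 snus_v1_alt
  rw [PySem.List.foldl_append_eq_flatMap, List.nil_append]
  exact congrArg String.ofList
    (congrArg (fun f => List.flatMap f raw.toList) (funext snus_block_eq))
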